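-- pv_equiv track=rewrite | github.com/minhtu-nguyen/coding-practice | educative/DP.py | count_ribbon_pieces
-- ===== SOURCE A (Python) =====
-- def count_ribbon_pieces(n, sizes):
--     # create the array to store the results
--     dp = [-1]*(n+1)
--     dp[0] = 0
--     # calculate the results for all combinations
--     # and select the maximum
--     for i in range(1, n+1):
--       for c in sizes:
--         if i-c >= 0 and dp[i-c] != -1:
--           dp[i] = max(dp[i], 1 + dp[i-c])
--
--     if dp[n] != -1:
--         return dp[n]
--     else:
--         return -1
-- ===== SOURCE B (Python) =====
-- def count_ribbon_pieces(n, sizes):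
--     # Demand-driven (top-down) evaluation: find the remainders actually reachable
--     # from n by cutting pieces, then solve only those subproblems, smallest first,
--     # in a dict -- instead of filling a dense table over every length 0..n.
--     # phase 1: reachable remainders (worklist BFS)
--     need = {n}
--     frontier = [n]
--     while frontier:
--         r = frontier.pop()
--         for c in sizes:
--             j = r - c
--             if j >= 0 and j not in need:
--                 need.add(j)
--                 frontier.append(j)
--     # phase 2: solve the needed subproblems in increasing order
--     memo = {}
--     for r in sorted(need):
--         if r == 0:
--             memo[0] = 0
--             continue
--         best = -1
--         for c in sizes:
--             j = r - c
--             if j >= 0 and memo[j] != -1: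
--                 best = max(best, 1 + memo[j])
--         memo[r] = best
--     return memo[n]
-- ===== Notes on version B (the rewrite author's own statement) =====
-- stated objective: alternative
-- what changed: Replaced A's dense bottom-up table over every length 0..n by demand-driven top-down evaluation: a worklist search first collects only the remainders reachable from n by cutting pieces, then a dict memo is filled over exactly those subproblems in increasing order.
-- outside the precondition, e.g. on count_ribbon_pieces(2, [1, 0]): A returns 4, B raises KeyError; on count_ribbon_pieces(2, [0]): A returns -1, B raises KeyError; on count_ribbon_pieces(0, [-1]): A returns 0, B does not finish within the time limit
import Mathlib
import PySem

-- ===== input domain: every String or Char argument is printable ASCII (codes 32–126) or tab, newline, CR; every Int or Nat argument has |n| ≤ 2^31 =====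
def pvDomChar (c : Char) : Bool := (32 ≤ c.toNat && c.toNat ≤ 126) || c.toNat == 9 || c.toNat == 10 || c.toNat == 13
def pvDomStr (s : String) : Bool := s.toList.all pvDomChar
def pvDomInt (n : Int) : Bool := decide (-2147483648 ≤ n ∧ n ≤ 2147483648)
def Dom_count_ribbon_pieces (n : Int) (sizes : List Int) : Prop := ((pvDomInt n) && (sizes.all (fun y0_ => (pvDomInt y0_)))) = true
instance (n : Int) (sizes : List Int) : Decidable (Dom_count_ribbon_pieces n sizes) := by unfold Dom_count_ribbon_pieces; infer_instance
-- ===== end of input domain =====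

-- B replaces A's dense bottom-up table over all lengths 0..n by a demand-driven evaluation:
-- a worklist search collects the remainders reachable from n, then a dict memo is filled
-- over exactly those subproblems in increasing order (alternative decomposition, same worst-case cost).


-- ===== PORT A =====
-- inner loop body: 'if i-c >= 0 and dp[i-c] != -1: dp[i] = max(dp[i], 1 + dp[i-c])'
-- (the Python list dp is an Array here; .toNat indexing is exact under Pre_, where every
-- index read or written is nonnegative and in range)
def stepA_inner (i : Int) (dp : Array Int) (c : Int) : Array Int :=
  if 0 ≤ i - c ∧ dp.getD (i - c).toNat (-1) ≠ -1 then
    dp.setIfInBounds i.toNat (max (dp.getD i.toNat (-1)) (1 + dp.getD (i - c).toNat (-1)))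
  else dp

def stepA_outer (sizes : List Int) (dp : Array Int) (i : Int) : Array Int :=
  sizes.foldl (stepA_inner i) dp

def count_ribbon_pieces (n : Int) (sizes : List Int) : Int :=
  -- dp = [-1]*(n+1); dp[0] = 0
  let dp := (Array.replicate (n + 1).toNat (-1)).setIfInBounds 0 0
  -- for i in range(1, n+1): for c in sizes: …
  let dp := (PySem.List.pyRange 1 (n + 1) 1).foldl (stepA_outer sizes) dp
  if dp.getD n.toNat (-1) ≠ -1 then dp.getD n.toNat (-1) else -1

-- ===== PORT B =====
-- phase-1 inner loop body: 'j = r - c; if j >= 0 and j not in need: need.add(j); frontier.append(j)'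
def bfsStep (r : Int) (st : List Int × PySem.Set Int) (c : Int) : List Int × PySem.Set Int :=
  let j := r - c
  if 0 ≤ j ∧ j ∉ st.2 then (st.1 ++ [j], PySem.Set.add st.2 j) else st

-- phase-1 'while frontier:' loop; 'r = frontier.pop()' pops the LAST element.
-- The fuel 2*n.toNat + 1 is an upper bound on the number of iterations under Pre_
-- (proved in bfs_spec below); the Python loop has no fuel.
def bfs (sizes : List Int) : Nat → List Int → PySem.Set Int → PySem.Set Int
  | 0, _, need => need
  | _ + 1, [], need => need
  | f + 1, x :: xs, need =>
      let r := (x :: xs).getLastD 0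
      let st := sizes.foldl (bfsStep r) ((x :: xs).dropLast, need)
      bfs sizes f st.1 st.2

-- phase-2 inner loop body: 'if j >= 0 and memo[j] != -1: best = max(best, 1 + memo[j])'
-- (memo[j] ported as getD j (-1): under Pre_ the key j is always present when 0 ≤ j — see fill_spec)
def fillInner (memo : PySem.Dict Int Int) (r : Int) (best : Int) (c : Int) : Int :=
  if 0 ≤ r - c ∧ memo.getD (r - c) (-1) ≠ -1 then max best (1 + memo.getD (r - c) (-1)) else best

-- phase-2 loop body: one iteration of 'for r in sorted(need): …'
def fillStep (sizes : List Int) (memo : PySem.Dict Int Int) (r : Int) : PySem.Dict Int Int :=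
  if r = 0 then memo.insert 0 0
  else memo.insert r (sizes.foldl (fillInner memo r) (-1))

def count_ribbon_pieces_alt (n : Int) (sizes : List Int) : Int :=
  -- need = {n}; frontier = [n]; while frontier: …
  let need := bfs sizes (2 * n.toNat + 1) [n] (PySem.Set.ofList [n])
  -- memo = {}; for r in sorted(need): …
  let memo := (PySem.List.sorted need (fun x => x) false).foldl (fillStep sizes) (PySem.Dict.mk [])
  -- return memo[n] (the key n is always present under Pre_)
  memo.getD n (-1)

-- ===== PRECONDITION & SPEC =====
-- Pre_ excludes negative n and non-positive sizes (except 0-sizes when n = 0, where the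
-- loops never touch them): A raises IndexError on negative n (dp[0] = 0 on an empty table)
-- and on any negative size when n ≥ 1 (the index i - c overruns the table); on sizes
-- containing 0 with n ≥ 1 (an unbounded problem) B's demand-driven search either diverges
-- or hits a missing key (KeyError in the Python) while A returns an order-dependent
-- finite count, so those inputs are excluded too.
def Pre_count_ribbon_pieces (n : Int) (sizes : List Int) : Prop :=
  0 ≤ n ∧ ∀ c ∈ sizes, 1 ≤ c ∨ (n = 0 ∧ c = 0)
instance (n : Int) (sizes : List Int) : Decidable (Pre_count_ribbon_pieces n sizes) := by
  unfold Pre_count_ribbon_pieces; infer_instance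

def pvWitness_count_ribbon_pieces : Int × List Int := (7, [2, 3])

def Spec_count_ribbon_pieces (n : Int) (sizes : List Int) (out : Int) : Prop := out = count_ribbon_pieces_alt n sizes
instance (n : Int) (sizes : List Int) (out : Int) : Decidable (Spec_count_ribbon_pieces n sizes out) := by
  unfold Spec_count_ribbon_pieces; infer_instance

-- ===== CLAIM (what is proved, stated in full; the proofs are below) =====
def Claim_equal_count_ribbon_pieces : Prop := ∀ (n : Int) (sizes : List Int), Dom_count_ribbon_pieces n sizes → Pre_count_ribbon_pieces n sizes → Spec_count_ribbon_pieces n sizes (count_ribbon_pieces n sizes)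

-- ===== LEMMAS AND PROOFS =====

-- The mathematical value both programs compute: G sizes r = max number of pieces (all of
-- size ≥ 1, taken from sizes) summing exactly to r, or -1 if unreachable; defined by a
-- fuelled recursion on the remainder (fuel r.toNat + 1 always suffices).
def gF (sizes : List Int) : Nat → Int → Int
  | 0, _ => -1
  | (f + 1), r =>
    if r = 0 then 0
    else sizes.foldl (fun b c =>
      if 1 ≤ c ∧ 0 ≤ r - c ∧ gF sizes f (r - c) ≠ -1 then max b (1 + gF sizes f (r - c)) else b) (-1)

def G (sizes : List Int) (r : Int) : Int := gF sizes (r.toNat + 1) r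

theorem gF_mono (sizes : List Int) : ∀ (f f' : Nat) (r : Int), 0 ≤ r → r.toNat < f → r.toNat < f' →
    gF sizes f r = gF sizes f' r := by
  intro f
  induction f with
  | zero => intro f' r h0 h1 h2; omega
  | succ f0 ih =>
    intro f' r h0 h1 h2
    cases f' with
    | zero => omega
    | succ f1 =>
      simp only [gF]
      by_cases hr : r = 0
      · simp [hr]
      · rw [if_neg hr, if_neg hr]
        apply PySem.List.foldl_congr_mem
        intro acc c hc
        by_cases hcg : 1 ≤ c ∧ 0 ≤ r - c
        · rw [ih f1 (r - c) (by omega) (by omega) (by omega)]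
        · rw [if_neg (by tauto), if_neg (by tauto)]

theorem G_zero (sizes : List Int) : G sizes 0 = 0 := by simp [G, gF]

theorem G_rec (sizes : List Int) (r : Int) (h : 0 < r) :
    G sizes r = sizes.foldl (fun b c =>
      if 1 ≤ c ∧ 0 ≤ r - c ∧ G sizes (r - c) ≠ -1 then max b (1 + G sizes (r - c)) else b) (-1) := by
  rw [show G sizes r = gF sizes (r.toNat + 1) r from rfl]
  simp only [gF]
  rw [if_neg (by omega)]
  apply PySem.List.foldl_congr_mem
  intro acc c hc
  by_cases hcg : 1 ≤ c ∧ 0 ≤ r - c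
  · have hGc : gF sizes r.toNat (r - c) = G sizes (r - c) :=
      gF_mono sizes r.toNat ((r - c).toNat + 1) (r - c) (by omega) (by omega) (by omega)
    rw [hGc]
  · rw [if_neg (by tauto), if_neg (by tauto)]

-- ---------- A side ----------

theorem getD_set_int (xs : Array Int) (i j v : Int) (h0 : 0 ≤ i) (h : i < (xs.size : Int))
    (hj : 0 ≤ j) :
    (xs.setIfInBounds i.toNat v).getD j.toNat (-1)
      = if j = i then v else xs.getD j.toNat (-1) := by
  rw [Array.getD_eq_getD_getElem?, Array.getD_eq_getD_getElem?, Array.getElem?_setIfInBounds]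
  by_cases hij : j = i
  · rw [if_pos (show i.toNat = j.toNat by omega), if_pos (show i.toNat < xs.size by omega),
      if_pos hij]
    rfl
  · rw [if_neg (show ¬ i.toNat = j.toNat by omega), if_neg hij]

theorem getD_replicate_set (n j : Int) (hn : 0 ≤ n) (hj0 : 0 ≤ j) (hjn : j ≤ n) :
    ((Array.replicate (n + 1).toNat (-1 : Int)).setIfInBounds 0 0).getD j.toNat (-1)
      = if j = 0 then 0 else -1 := by
  rw [Array.getD_eq_getD_getElem?, Array.getElem?_setIfInBounds]
  by_cases hj : j = 0
  · rw [if_pos (show 0 = j.toNat by omega), if_pos (by rw [Array.size_replicate]; omega),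
      if_pos hj]
    rfl
  · rw [if_neg (show ¬ 0 = j.toNat by omega), if_neg hj, Array.getElem?_replicate,
      if_pos (by omega)]
    rfl

theorem innerA (sizes : List Int) (i : Int) : ∀ (l : List Int) (dp : Array Int),
    (∀ c ∈ l, 1 ≤ c) → 0 ≤ i → i < (dp.size : Int) →
    (∀ j : Int, 0 ≤ j → j < i → dp.getD j.toNat (-1) = G sizes j) →
    (l.foldl (stepA_inner i) dp).size = dp.size ∧
    (∀ j : Int, 0 ≤ j → j ≠ i → (l.foldl (stepA_inner i) dp).getD j.toNat (-1) = dp.getD j.toNat (-1)) ∧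
    (l.foldl (stepA_inner i) dp).getD i.toNat (-1)
      = l.foldl (fun b c => if 1 ≤ c ∧ 0 ≤ i - c ∧ G sizes (i - c) ≠ -1 then max b (1 + G sizes (i - c)) else b)
          (dp.getD i.toNat (-1)) := by
  intro l
  induction l with
  | nil => exact fun dp _ _ _ _ => ⟨rfl, fun _ _ _ => rfl, rfl⟩
  | cons c t ih =>
    intro dp hpos h0 hlen hG
    have hc1 : 1 ≤ c := hpos c (List.mem_cons_self)
    have hpt : ∀ x ∈ t, 1 ≤ x := fun x hx => hpos x (List.mem_cons_of_mem c hx)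
    simp only [List.foldl]
    by_cases hg : 0 ≤ i - c ∧ dp.getD (i - c).toNat (-1) ≠ -1
    · have hread : dp.getD (i - c).toNat (-1) = G sizes (i - c) :=
        hG (i - c) hg.1 (by omega)
      have hstep : stepA_inner i dp c
          = dp.setIfInBounds i.toNat (max (dp.getD i.toNat (-1)) (1 + dp.getD (i - c).toNat (-1))) := by
        unfold stepA_inner; rw [if_pos hg]
      rw [hstep]
      set dp1 := dp.setIfInBounds i.toNat (max (dp.getD i.toNat (-1)) (1 + dp.getD (i - c).toNat (-1))) with hdp1
      have hlen1 : dp1.size = dp.size := Array.size_setIfInBounds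
      have hget1 : ∀ j : Int, 0 ≤ j → dp1.getD j.toNat (-1)
          = if j = i then max (dp.getD i.toNat (-1)) (1 + dp.getD (i - c).toNat (-1))
            else dp.getD j.toNat (-1) :=
        fun j hj => getD_set_int dp i j _ h0 hlen hj
      obtain ⟨L, U, E⟩ := ih dp1 hpt h0 (by rw [hlen1]; exact hlen)
        (fun j hj0 hji => by rw [hget1 j hj0, if_neg (by omega)]; exact hG j hj0 hji)
      refine ⟨by rw [L, hlen1], ?_, ?_⟩
      · intro j hj0 hj
        rw [U j hj0 hj, hget1 j hj0, if_neg hj]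
      · rw [E, hget1 i h0, if_pos rfl, hread,
          if_pos ⟨hc1, hg.1, by rw [← hread]; exact hg.2⟩]
    · have hstep : stepA_inner i dp c = dp := by unfold stepA_inner; rw [if_neg hg]
      rw [hstep]
      obtain ⟨L, U, E⟩ := ih dp hpt h0 hlen hG
      refine ⟨L, U, ?_⟩
      rw [E]
      have hgF : ¬ (1 ≤ c ∧ 0 ≤ i - c ∧ G sizes (i - c) ≠ -1) := by
        rintro ⟨_, hic, hGne⟩
        exact hg ⟨hic, by rw [hG (i - c) hic (by omega)]; exact hGne⟩
      rw [if_neg hgF]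

theorem outerA (n : Int) (sizes : List Int) (hn : 0 ≤ n) (hpos : ∀ c ∈ sizes, 1 ≤ c) :
    ∀ (m : Int), 1 ≤ m → m ≤ n + 1 →
    ((PySem.List.pyRange 1 m 1).foldl (stepA_outer sizes)
        ((Array.replicate (n + 1).toNat (-1)).setIfInBounds 0 0)).size = (n + 1).toNat ∧
    (∀ j : Int, 0 ≤ j → j ≤ n →
      ((PySem.List.pyRange 1 m 1).foldl (stepA_outer sizes)
          ((Array.replicate (n + 1).toNat (-1)).setIfInBounds 0 0)).getD j.toNat (-1)
        = if j < m then G sizes j else -1) := by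
  intro m hm1
  induction m, hm1 using Int.le_induction with
  | base =>
    intro _
    rw [PySem.List.pyRange_one_eq_nil (le_refl 1)]
    simp only [List.foldl]
    constructor
    · rw [Array.size_setIfInBounds, Array.size_replicate]
    · intro j hj0 hjn
      rw [getD_replicate_set n j hn hj0 hjn]
      by_cases hj : j = 0
      · rw [if_pos hj, hj, if_pos (by omega), G_zero]
      · rw [if_neg hj, if_neg (by omega)]
  | succ m hm ihm =>
    intro hmn
    obtain ⟨IL, IG⟩ := ihm (by omega)
    rw [PySem.List.pyRange_one_succ_right (by omega), List.foldl_append]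
    set dpm := (PySem.List.pyRange 1 m 1).foldl (stepA_outer sizes)
      ((Array.replicate (n + 1).toNat (-1)).setIfInBounds 0 0) with hdpm
    simp only [List.foldl]
    have hmlen : m < (dpm.size : Int) := by rw [IL]; omega
    obtain ⟨L, U, E⟩ := innerA sizes m sizes dpm hpos (by omega) hmlen
      (fun j hj0 hjm => by rw [IG j hj0 (by omega), if_pos hjm])
    have hacc : dpm.getD m.toNat (-1) = -1 := by
      rw [IG m (by omega) (by omega), if_neg (by omega)]
    constructor
    · rw [show stepA_outer sizes dpm m = sizes.foldl (stepA_inner m) dpm from rfl, L, IL]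
    · intro j hj0 hjn
      rw [show stepA_outer sizes dpm m = sizes.foldl (stepA_inner m) dpm from rfl]
      by_cases hj : j = m
      · subst hj
        rw [E, hacc, if_pos (by omega), ← G_rec sizes j (by omega)]
      · rw [U j hj0 hj, IG j hj0 hjn]
        by_cases hjm : j < m
        · rw [if_pos hjm, if_pos (by omega)]
        · rw [if_neg hjm, if_neg (by omega)]

theorem A_eq_G (n : Int) (sizes : List Int) (hn : 0 ≤ n) (hpos : ∀ c ∈ sizes, 1 ≤ c) :
    count_ribbon_pieces n sizes = G sizes n := by
  unfold count_ribbon_pieces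
  dsimp only
  obtain ⟨L, IG⟩ := outerA n sizes hn hpos (n + 1) (by omega) (le_refl _)
  rw [IG n hn (le_refl n)]
  rw [if_pos (show n < n + 1 by omega)]
  by_cases h : G sizes n ≠ -1
  · rw [if_pos h]
  · rw [if_neg h]; omega

-- ---------- B side, phase 1: the worklist search ----------

-- distinct integers in [0, n] are at most n + 1 many
theorem length_le_of_nodup_bounded (n : Int) (l : List Int) (hnd : l.Nodup)
    (hb : ∀ x ∈ l, 0 ≤ x ∧ x ≤ n) : l.length ≤ n.toNat + 1 := by
  have h1 : l.toFinset ⊆ Finset.Icc (0 : Int) n := by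
    intro x hx
    rw [List.mem_toFinset] at hx
    obtain ⟨h2, h3⟩ := hb x hx
    rw [Finset.mem_Icc]
    exact ⟨h2, h3⟩
  have h2 := Finset.card_le_card h1
  rw [List.toFinset_card_of_nodup hnd, Int.card_Icc] at h2
  omega

-- one pass of the phase-1 inner 'for c in sizes' loop
theorem bfsFold (r : Int) : ∀ (l fr : List Int) (nd : PySem.Set Int),
    (∀ x ∈ fr, x ∈ (l.foldl (bfsStep r) (fr, nd)).1) ∧
    (∀ x ∈ nd, x ∈ (l.foldl (bfsStep r) (fr, nd)).2) ∧
    (∀ x ∈ (l.foldl (bfsStep r) (fr, nd)).2,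
      x ∈ nd ∨ (x ∈ (l.foldl (bfsStep r) (fr, nd)).1 ∧ ∃ c ∈ l, x = r - c ∧ 0 ≤ x)) ∧
    (∀ x ∈ (l.foldl (bfsStep r) (fr, nd)).1, x ∈ fr ∨ x ∈ (l.foldl (bfsStep r) (fr, nd)).2) ∧
    (∀ c ∈ l, 0 ≤ r - c → r - c ∈ (l.foldl (bfsStep r) (fr, nd)).2) ∧
    ((l.foldl (bfsStep r) (fr, nd)).1.length + nd.length
      = fr.length + (l.foldl (bfsStep r) (fr, nd)).2.length) ∧
    (nd.Nodup → (l.foldl (bfsStep r) (fr, nd)).2.Nodup) ∧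
    nd.length ≤ (l.foldl (bfsStep r) (fr, nd)).2.length := by
  intro l
  induction l with
  | nil =>
    intro fr nd
    exact ⟨fun x hx => hx, fun x hx => hx,
      fun x hx => Or.inl hx, fun x hx => Or.inl hx,
      fun c hc => absurd hc (List.not_mem_nil), rfl, fun h => h, le_refl _⟩
  | cons c t ih =>
    intro fr nd
    simp only [List.foldl]
    by_cases hcond : 0 ≤ r - c ∧ r - c ∉ nd
    · have hstep : bfsStep r (fr, nd) c = (fr ++ [r - c], PySem.Set.add nd (r - c)) := by
        unfold bfsStep; rw [if_pos hcond]
      rw [hstep]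
      obtain ⟨C1, C2, C3, C4, C5, C6, C7, C8⟩ := ih (fr ++ [r - c]) (PySem.Set.add nd (r - c))
      have hmemadd : ∀ y, y ∈ PySem.Set.add nd (r - c) ↔ y ∈ nd ∨ y = r - c :=
        fun y => PySem.Set.mem_add nd (r - c) y
      refine ⟨?_, ?_, ?_, ?_, ?_, ?_, ?_, ?_⟩
      · exact fun x hx => C1 x (List.mem_append_left _ hx)
      · exact fun x hx => C2 x ((hmemadd x).mpr (Or.inl hx))
      · intro x hx
        rcases C3 x hx with h | ⟨h1, c', hc', he, hge⟩
        · rcases (hmemadd x).mp h with h' | h'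
          · exact Or.inl h'
          · exact Or.inr ⟨C1 x (by rw [h']; exact List.mem_append_right _ (List.mem_singleton_self _)),
              c, List.mem_cons_self, h', by rw [h']; exact hcond.1⟩
        · exact Or.inr ⟨h1, c', List.mem_cons_of_mem c hc', he, hge⟩
      · intro x hx
        rcases C4 x hx with h | h
        · rcases List.mem_append.mp h with h' | h'
          · exact Or.inl h'
          · exact Or.inr (C2 x ((hmemadd x).mpr (Or.inr (List.mem_singleton.mp h'))))
        · exact Or.inr h
      · intro c' hc' hge
        rcases List.mem_cons.mp hc' with h | h
        · subst h; exact C2 _ ((hmemadd _).mpr (Or.inr rfl))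
        · exact C5 c' h hge
      · have hlen : (PySem.Set.add nd (r - c)).length = nd.length + 1 := by
          rw [PySem.Set.add_of_not_mem hcond.2, List.length_append, List.length_cons, List.length_nil]
        rw [List.length_append, List.length_cons, List.length_nil] at C6
        omega
      · exact fun h => C7 (PySem.Set.nodup_add nd (r - c) h)
      · have hlen : (PySem.Set.add nd (r - c)).length = nd.length + 1 := by
          rw [PySem.Set.add_of_not_mem hcond.2, List.length_append, List.length_cons, List.length_nil]
        omega
    · have hstep : bfsStep r (fr, nd) c = (fr, nd) := by
        unfold bfsStep; rw [if_neg hcond]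
      rw [hstep]
      obtain ⟨C1, C2, C3, C4, C5, C6, C7, C8⟩ := ih fr nd
      refine ⟨C1, C2, ?_, C4, ?_, C6, C7, C8⟩
      · intro x hx
        rcases C3 x hx with h | ⟨h1, c', hc', he, hge⟩
        · exact Or.inl h
        · exact Or.inr ⟨h1, c', List.mem_cons_of_mem c hc', he, hge⟩
      · intro c' hc' hge
        rcases List.mem_cons.mp hc' with h | h
        · subst h
          have : r - c' ∈ nd := by
            by_contra hmem
            exact hcond ⟨hge, hmem⟩
          exact C2 _ this
        · exact C5 c' h hge

-- the phase-1 loop terminates within the fuel and returns a superset of need,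
-- bounded, duplicate-free, and closed under cutting one piece
theorem bfs_spec (n : Int) (sizes : List Int) (hpos : ∀ c ∈ sizes, 1 ≤ c) :
    ∀ (fuel : Nat) (frontier : List Int) (need : PySem.Set Int),
    need.Nodup →
    (∀ x ∈ need, 0 ≤ x ∧ x ≤ n) →
    (∀ x ∈ frontier, x ∈ need) →
    (∀ x ∈ need, x ∈ frontier ∨ ∀ c ∈ sizes, 0 ≤ x - c → x - c ∈ need) →
    frontier.length + 2 * ((n.toNat + 1) - need.length) ≤ fuel →
    (∀ x ∈ need, x ∈ bfs sizes fuel frontier need) ∧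
    (∀ x ∈ bfs sizes fuel frontier need, 0 ≤ x ∧ x ≤ n) ∧
    (bfs sizes fuel frontier need).Nodup ∧
    (∀ x ∈ bfs sizes fuel frontier need, ∀ c ∈ sizes, 0 ≤ x - c →
      x - c ∈ bfs sizes fuel frontier need) := by
  intro fuel
  induction fuel with
  | zero =>
    intro frontier need hnd hb hfn hpp hm
    have hfr : frontier = [] := by
      cases frontier with
      | nil => rfl
      | cons a t => simp [List.length_cons] at hm
    subst hfr
    refine ⟨fun x hx => hx, hb, hnd, ?_⟩
    intro x hx c hc hge
    rcases hpp x hx with h | h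
    · exact absurd h (List.not_mem_nil)
    · exact h c hc hge
  | succ f ih =>
    intro frontier need hnd hb hfn hpp hm
    cases frontier with
    | nil =>
      refine ⟨fun x hx => hx, hb, hnd, ?_⟩
      intro x hx c hc hge
      rcases hpp x hx with h | h
      · exact absurd h (List.not_mem_nil)
      · exact h c hc hge
    | cons a t =>
      have hne : (a :: t) ≠ [] := List.cons_ne_nil a t
      set r := (a :: t).getLastD 0 with hr
      have hrlast : r = (a :: t).getLast hne := by
        rw [hr, List.getLastD_eq_getLast?, List.getLast?_eq_some_getLast hne]
        rfl
      have hrmem : r ∈ (a :: t) := by rw [hrlast]; exact List.getLast_mem hne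
      have hrneed : r ∈ need := hfn r hrmem
      have hrb : 0 ≤ r ∧ r ≤ n := hb r hrneed
      have hsplit : (a :: t).dropLast ++ [r] = a :: t := by
        rw [hrlast]; exact List.dropLast_append_getLast hne
      obtain ⟨C1, C2, C3, C4, C5, C6, C7, C8⟩ := bfsFold r sizes (a :: t).dropLast need
      set st := sizes.foldl (bfsStep r) ((a :: t).dropLast, need) with hst
      have hbfs : bfs sizes (f + 1) (a :: t) need = bfs sizes f st.1 st.2 := by
        simp only [bfs]
        rfl
      have hnd2 : st.2.Nodup := C7 hnd
      have hb2 : ∀ x ∈ st.2, 0 ≤ x ∧ x ≤ n := by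
        intro x hx
        rcases C3 x hx with h | ⟨_, c, hc, he, hge⟩
        · exact hb x h
        · have := hpos c hc
          constructor
          · exact hge
          · omega
      have hfn2 : ∀ x ∈ st.1, x ∈ st.2 := by
        intro x hx
        rcases C4 x hx with h | h
        · exact C2 x (hfn x (List.mem_of_mem_dropLast h))
        · exact h
      have hpp2 : ∀ x ∈ st.2, x ∈ st.1 ∨ ∀ c ∈ sizes, 0 ≤ x - c → x - c ∈ st.2 := by
        intro x hx
        rcases C3 x hx with h | ⟨h1, _⟩
        · rcases hpp x h with h' | h'
          · rcases List.mem_append.mp (show x ∈ (a :: t).dropLast ++ [r] by rw [hsplit]; exact h') with h'' | h''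
            · exact Or.inl (C1 x h'')
            · rw [List.mem_singleton.mp h'']
              exact Or.inr (fun c hc hge => C5 c hc hge)
          · exact Or.inr (fun c hc hge => C2 _ (h' c hc hge))
        · exact Or.inl h1
      have hcard : need.length ≤ st.2.length := C8
      have hcard2 : st.2.length ≤ n.toNat + 1 :=
        length_le_of_nodup_bounded n st.2 hnd2 hb2
      have hlen : (a :: t).dropLast.length + 1 = (a :: t).length := by
        rw [List.length_dropLast, List.length_cons]
        omega
      have hm2 : st.1.length + 2 * ((n.toNat + 1) - st.2.length) ≤ f := by
        have h6 := C6
        have hneedle : need.length ≤ n.toNat + 1 :=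
          length_le_of_nodup_bounded n need hnd hb
        omega
      obtain ⟨D1, D2, D3, D4⟩ := ih st.1 st.2 hnd2 hb2 hfn2 hpp2 hm2
      rw [hbfs]
      exact ⟨fun x hx => D1 x (C2 x hx), D2, D3, D4⟩

-- ---------- B side, phase 2: the fill over sorted(need) ----------

theorem fill_spec (sizes : List Int) (hpos : ∀ c ∈ sizes, 1 ≤ c) (S : List Int)
    (hS0 : ∀ x ∈ S, 0 ≤ x)
    (hclosed : ∀ x ∈ S, ∀ c ∈ sizes, 0 ≤ x - c → x - c ∈ S) :
    ∀ (l : List Int) (memo : PySem.Dict Int Int),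
    (∀ x ∈ l, x ∈ S) →
    l.Pairwise (· < ·) →
    (∀ x ∈ S, x ∉ l → memo.get? x = some (G sizes x)) →
    ∀ x ∈ S, (l.foldl (fillStep sizes) memo).get? x = some (G sizes x) := by
  intro l
  induction l with
  | nil => exact fun memo _ _ hinv x hx => hinv x hx (List.not_mem_nil)
  | cons r t ih =>
    intro memo hsub hpw hinv
    have hrS : r ∈ S := hsub r List.mem_cons_self
    have hr0 : 0 ≤ r := hS0 r hrS
    have hlt : ∀ y ∈ t, r < y := fun y hy => List.rel_of_pairwise_cons hpw hy
    simp only [List.foldl]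
    apply ih (fillStep sizes memo r)
      (fun x hx => hsub x (List.mem_cons_of_mem r hx))
      (List.Pairwise.of_cons hpw)
    intro x hxS hxt
    by_cases hxr : x = r
    · subst hxr
      by_cases hx0 : x = 0
      · subst hx0
        unfold fillStep
        rw [if_pos rfl, PySem.Dict.get?_insert_self, G_zero]
      · unfold fillStep
        rw [if_neg hx0, PySem.Dict.get?_insert_self]
        congr 1
        have hxpos : 0 < x := by omega
        rw [G_rec sizes x hxpos]
        apply PySem.List.foldl_congr_mem
        intro acc c hc
        have hc1 : 1 ≤ c := hpos c hc
        by_cases hge : 0 ≤ x - c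
        · have hjS : x - c ∈ S := hclosed x hxS c hc hge
          have hjl : x - c ∉ (x :: t) := by
            intro hmem
            rcases List.mem_cons.mp hmem with h | h
            · omega
            · have := hlt _ h; omega
          have hjget : memo.get? (x - c) = some (G sizes (x - c)) := hinv _ hjS hjl
          have hjgetD : memo.getD (x - c) (-1) = G sizes (x - c) := by
            rw [PySem.Dict.getD_eq_get?_getD, hjget]; rfl
          unfold fillInner
          rw [hjgetD]
          by_cases hne : G sizes (x - c) ≠ -1
          · rw [if_pos ⟨hge, hne⟩, if_pos ⟨hc1, hge, hne⟩]
          · rw [if_neg (by tauto), if_neg (by tauto)]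
        · unfold fillInner
          rw [if_neg (by tauto), if_neg (by tauto)]
    · have hxl : x ∉ (r :: t) := by
        intro hmem
        rcases List.mem_cons.mp hmem with h | h
        · exact hxr h
        · exact hxt h
      have hkey : ∀ v : Int, (memo.insert r v).get? x = memo.get? x :=
        fun v => PySem.Dict.get?_insert_of_ne _ _ hxr
      unfold fillStep
      by_cases hr0' : r = 0
      · subst hr0'
        rw [if_pos rfl, hkey 0]
        exact hinv x hxS hxl
      · rw [if_neg hr0', hkey _]
        exact hinv x hxS hxl

-- Pairwise (≤) plus Nodup gives strict ascent for sorted(set(…))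
theorem pairwise_lt_of_le_nodup (l : List Int)
    (h1 : l.Pairwise (· ≤ ·)) (h2 : l.Nodup) : l.Pairwise (· < ·) :=
  (h1.and h2).imp (fun h => lt_of_le_of_ne h.1 h.2)

theorem B_eq_G (n : Int) (sizes : List Int) (hn : 0 ≤ n) (hpos : ∀ c ∈ sizes, 1 ≤ c) :
    count_ribbon_pieces_alt n sizes = G sizes n := by
  unfold count_ribbon_pieces_alt
  dsimp only
  have hofl : PySem.Set.ofList [n] = [n] :=
    PySem.Set.ofList_eq_self_of_nodup _ (List.nodup_singleton n)
  rw [hofl]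
  obtain ⟨S1, S2, S3, S4⟩ := bfs_spec n sizes hpos (2 * n.toNat + 1) [n] [n]
    (List.nodup_singleton n)
    (fun x hx => by rw [List.mem_singleton.mp hx]; exact ⟨hn, le_refl n⟩)
    (fun x hx => hx)
    (fun x hx => Or.inl hx)
    (by simp [List.length_cons]; omega)
  set S := bfs sizes (2 * n.toNat + 1) [n] [n] with hS
  have hnS : n ∈ S := S1 n (List.mem_singleton_self n)
  set ord := PySem.List.sorted S (fun x => x) false with hord
  have hmemord : ∀ x, x ∈ ord ↔ x ∈ S := fun x => PySem.List.mem_sorted S (fun y => y) false x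
  have hndord : ord.Nodup := (PySem.List.sorted_perm S (fun y => y) false).nodup_iff.mpr S3
  have hpword : ord.Pairwise (· < ·) :=
    pairwise_lt_of_le_nodup ord (PySem.List.sorted_pairwise S (fun y => y)) hndord
  have hfill := fill_spec sizes hpos S (fun x hx => (S2 x hx).1) S4 ord (PySem.Dict.mk [])
    (fun x hx => (hmemord x).mp hx) hpword
    (fun x hxS hxord => absurd ((hmemord x).mpr hxS) hxord)
  have hget := hfill n hnS
  rw [PySem.Dict.getD_eq_get?_getD, hget]
  rfl

-- ---------- the n = 0 corner (0-sizes allowed): both programs answer 0 at once ----------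

theorem A_zero (sizes : List Int) : count_ribbon_pieces 0 sizes = 0 := by
  unfold count_ribbon_pieces
  dsimp only
  rw [PySem.List.pyRange_one_eq_nil (by omega : (0 : Int) + 1 ≤ 1), List.foldl_nil]
  rfl

theorem B_zero (sizes : List Int) (h0 : ∀ c ∈ sizes, 0 ≤ c) :
    count_ribbon_pieces_alt 0 sizes = 0 := by
  have hfold : ∀ l : List Int, (∀ c ∈ l, 0 ≤ c) →
      l.foldl (bfsStep 0) ([], [0]) = (([] : List Int), ([0] : PySem.Set Int)) := by
    intro l
    induction l with
    | nil => intro _; rfl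
    | cons c t ih =>
      intro h
      have hc0 : 0 ≤ c := h c List.mem_cons_self
      have hone : bfsStep 0 ([], [0]) c = ([], [0]) := by
        unfold bfsStep
        rw [if_neg]
        rintro ⟨h1, h2⟩
        have hc : c = 0 := by omega
        exact h2 (by rw [hc]; exact List.mem_singleton_self 0)
      rw [List.foldl_cons, hone]
      exact ih (fun x hx => h x (List.mem_cons_of_mem c hx))
  have hbfs : bfs sizes (2 * (0 : Int).toNat + 1) [0] (PySem.Set.ofList [0]) = [0] := by
    show bfs sizes 1 [0] [0] = [0]
    simp only [bfs]
    rw [show ([(0 : Int)]).getLastD 0 = 0 from rfl, show ([(0 : Int)]).dropLast = [] from rfl,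
      hfold sizes h0]
  unfold count_ribbon_pieces_alt
  dsimp only
  rw [hbfs]
  rfl

-- ===== VERDICT (by name: the statement is the Claim_ definition above) =====
theorem count_ribbon_pieces_spec : Claim_equal_count_ribbon_pieces := by
  intro n sizes _ hpre
  obtain ⟨hn, hsz⟩ := hpre
  unfold Spec_count_ribbon_pieces
  by_cases hn0 : n = 0
  · subst hn0
    rw [A_zero sizes, B_zero sizes (fun c hc => by rcases hsz c hc with h | ⟨_, h⟩ <;> omega)]
  · have hpos : ∀ c ∈ sizes, 1 ≤ c := by
      intro c hc
      rcases hsz c hc with h | ⟨h1, _⟩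
      · exact h
      · exact absurd h1 hn0
    rw [A_eq_G n sizes hn hpos, B_eq_G n sizes hn hpos]
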